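-- pv_equiv track=rewrite | github.com/aditya9710/RBE-WPI | RBE 543/Assignment 2/TSP_GeneticAlgorithm.py | hasDuplicity
-- ===== SOURCE A (Python) =====
-- def hasDuplicity(auxArray, usedIndices):
--     for i in range(len(auxArray)):
--         for j in range(i, len(auxArray)):
--             if i != j and auxArray[i]  == auxArray[j]:
--                 if i in usedIndices:
--                     return j
--                 else:
--                     return i
--     return -1
-- ===== SOURCE B (Python) =====
-- def hasDuplicity(auxArray, usedIndices):
--     # Single pass: remember each value's first index; track the pair (i0, j) with the
--     # smallest first-occurrence index among values seen again.
--     first = {}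
--     best = None  # (first occurrence index, second occurrence index)
--     for j, v in enumerate(auxArray):
--         if v in first:
--             i0 = first[v]
--             if best is None or i0 < best[0]:
--                 best = (i0, j)
--         else:
--             first[v] = j
--     if best is None:
--         return -1
--     return best[1] if best[0] in usedIndices else best[0]
-- ===== Notes on version B (the rewrite author's own statement) =====
-- stated objective: alternative
-- what changed: Replaced the nested index loops (scan for a later equal element restarting for each i) by a single left-to-right pass that records each value's first index in a dict and keeps the best (smallest-first-index) duplicate pair while scanning.
import Mathlib
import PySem

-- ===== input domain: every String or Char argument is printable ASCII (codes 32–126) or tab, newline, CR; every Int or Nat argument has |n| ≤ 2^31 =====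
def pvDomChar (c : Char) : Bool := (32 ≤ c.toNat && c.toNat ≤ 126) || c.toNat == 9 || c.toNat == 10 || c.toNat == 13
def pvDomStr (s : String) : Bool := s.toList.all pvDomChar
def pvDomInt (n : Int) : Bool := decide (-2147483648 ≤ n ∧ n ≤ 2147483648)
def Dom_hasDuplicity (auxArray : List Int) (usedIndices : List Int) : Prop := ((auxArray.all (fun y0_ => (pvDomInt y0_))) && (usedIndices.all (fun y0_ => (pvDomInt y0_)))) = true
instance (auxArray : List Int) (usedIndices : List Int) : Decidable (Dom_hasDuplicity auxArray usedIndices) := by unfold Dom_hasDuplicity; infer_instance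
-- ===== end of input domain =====

-- B replaces A's nested index loops by one left-to-right pass with a dict of first
-- occurrences, keeping the best (smallest-first-index) duplicate pair (objective: alternative).

-- ===== PORT A =====
-- inner loop 'for j in range(i, len(auxArray))'; indices produced by range(len) are always
-- in range, so 'List.getD _ 0' is exact for Python's auxArray[i] / auxArray[j] here
def hdInner (aux used : List Int) (i : Nat) : List Nat → Option Int
  | [] => none
  | j :: js =>
    if i ≠ j ∧ aux.getD i 0 = aux.getD j 0 then
      some (if (i : Int) ∈ used then (j : Int) else (i : Int))
    else hdInner aux used i js

-- outer loop 'for i in range(len(auxArray))'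
def hdOuter (aux used : List Int) : List Nat → Int
  | [] => -1
  | i :: is =>
    match hdInner aux used i (List.range' i (aux.length - i)) with
    | some r => r
    | none => hdOuter aux used is

def hasDuplicity (auxArray : List Int) (usedIndices : List Int) : Int :=
  hdOuter auxArray usedIndices (List.range auxArray.length)

-- ===== PORT B =====
-- one step of B's 'for j, v in enumerate(auxArray)' loop; state = (first, best)
def hdStep (st : PySem.Dict Int Int × Option (Int × Int)) (p : Int × Int) :
    PySem.Dict Int Int × Option (Int × Int) :=
  match st.1.get? p.2 with
  | some i0 =>
    (st.1,
      match st.2 with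
      | none => some (i0, p.1)
      | some b => if i0 < b.1 then some (i0, p.1) else some b)
  | none => (st.1.insert p.2 p.1, st.2)

def hasDuplicity_alt (auxArray : List Int) (usedIndices : List Int) : Int :=
  let st := (PySem.List.enumerate auxArray).foldl hdStep (PySem.Dict.empty, none)
  match st.2 with
  | none => -1
  | some b => if b.1 ∈ usedIndices then b.2 else b.1

-- ===== PRECONDITION & SPEC =====
def Spec_hasDuplicity (auxArray : List Int) (usedIndices : List Int) (out : Int) : Prop := out = hasDuplicity_alt auxArray usedIndices
instance (auxArray : List Int) (usedIndices : List Int) (out : Int) : Decidable (Spec_hasDuplicity auxArray usedIndices out) := by unfold Spec_hasDuplicity; infer_instance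

-- ===== CLAIM (what is proved, stated in full; the proofs are below) =====
def Claim_equal_hasDuplicity : Prop := ∀ (auxArray : List Int) (usedIndices : List Int), Dom_hasDuplicity auxArray usedIndices → Spec_hasDuplicity auxArray usedIndices (hasDuplicity auxArray usedIndices)

-- ===== LEMMAS AND PROOFS =====

-- next occurrence of a.getD i 0 strictly after i (the value A's inner loop finds)
def nx (a : List Int) (i : Nat) : Option Nat :=
  (List.range' (i + 1) (a.length - (i + 1))).find? (fun j => a.getD i 0 == a.getD j 0)

def refp (a : List Int) : Option (Nat × Nat) :=
  match (List.range a.length).find? (fun i => (nx a i).isSome) with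
  | none => none
  | some i => (nx a i).map (fun j => (i, j))

def outF (r : Option (Nat × Nat)) (u : List Int) : Int :=
  match r with
  | none => -1
  | some b => if (b.1 : Int) ∈ u then (b.2 : Int) else (b.1 : Int)

lemma find?_range'_eq_none_iff (s n : Nat) (p : Nat → Bool) :
    (List.range' s n).find? p = none ↔ ∀ i, s ≤ i → i < s + n → p i = false := by
  induction n generalizing s with
  | zero => simp; omega
  | succ n ih =>
    rw [List.range'_succ, List.find?_cons]
    cases hp : p s with
    | true =>
      simp only [Option.some_ne_none, false_iff]
      intro h
      have := h s le_rfl (by omega)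
      simp [hp] at this
    | false =>
      rw [ih]
      constructor
      · intro h i h1 h2
        rcases eq_or_lt_of_le h1 with rfl | h1'
        · exact hp
        · exact h i h1' (by omega)
      · intro h i h1 h2; exact h i (by omega) (by omega)

lemma find?_range'_eq_some_iff (s n : Nat) (p : Nat → Bool) (j : Nat) :
    (List.range' s n).find? p = some j ↔
      s ≤ j ∧ j < s + n ∧ p j = true ∧ ∀ k, s ≤ k → k < j → p k = false := by
  induction n generalizing s with
  | zero => simp; omega
  | succ n ih =>
    rw [List.range'_succ, List.find?_cons]
    cases hp : p s with
    | true =>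
      simp only [Option.some.injEq]
      constructor
      · rintro rfl; exact ⟨le_rfl, by omega, hp, fun k h1 h2 => by omega⟩
      · rintro ⟨h1, h2, h3, h4⟩
        rcases eq_or_lt_of_le h1 with rfl | h
        · rfl
        · have := h4 s le_rfl h
          simp [hp] at this
    | false =>
      rw [ih]
      constructor
      · rintro ⟨h1, h2, h3, h4⟩
        refine ⟨by omega, by omega, h3, fun k hk1 hk2 => ?_⟩
        rcases eq_or_lt_of_le hk1 with rfl | hk'
        · exact hp
        · exact h4 k hk' hk2
      · rintro ⟨h1, h2, h3, h4⟩
        have hsj : s ≠ j := by rintro rfl; simp [hp] at h3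
        exact ⟨by omega, by omega, h3, fun k hk1 hk2 => h4 k (by omega) hk2⟩

lemma find?_congr_mem {α : Type} (l : List α) (p q : α → Bool)
    (h : ∀ x ∈ l, p x = q x) : l.find? p = l.find? q := by
  induction l with
  | nil => rfl
  | cons a l ih =>
    rw [List.find?_cons, List.find?_cons, h a (by simp)]
    cases q a
    · exact ih fun x hx => h x (by simp [hx])
    · rfl

lemma hdInner_eq_find (a u : List Int) (i : Nat) (js : List Nat) :
    hdInner a u i js =
      (js.find? (fun j => decide (i ≠ j) && (a.getD i 0 == a.getD j 0))).map
        (fun j => if (i : Int) ∈ u then (j : Int) else (i : Int)) := by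
  induction js with
  | nil => simp [hdInner]
  | cons j js ih =>
    rw [hdInner]
    by_cases hc : i ≠ j ∧ a.getD i 0 = a.getD j 0
    · have hb : (decide (i ≠ j) && (a.getD i 0 == a.getD j 0)) = true := by
        rw [Bool.and_eq_true, decide_eq_true_eq, beq_iff_eq]; exact hc
      rw [if_pos hc, List.find?_cons_of_pos (p := fun j' => decide (i ≠ j') && (a.getD i 0 == a.getD j' 0)) hb]; rfl
    · have hb : ¬ ((decide (i ≠ j) && (a.getD i 0 == a.getD j 0)) = true) := by
        rw [Bool.and_eq_true, decide_eq_true_eq, beq_iff_eq]; exact hc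
      rw [if_neg hc, List.find?_cons_of_neg (p := fun j' => decide (i ≠ j') && (a.getD i 0 == a.getD j' 0)) hb, ih]

lemma hdInner_range' (a u : List Int) (i : Nat) (h : i < a.length) :
    hdInner a u i (List.range' i (a.length - i)) =
      (nx a i).map (fun j => if (i : Int) ∈ u then (j : Int) else (i : Int)) := by
  have hn : a.length - i = (a.length - (i + 1)) + 1 := by omega
  rw [hn, List.range'_succ, hdInner]
  have hno : ¬ (i ≠ i ∧ a.getD i 0 = a.getD i 0) := by simp
  rw [if_neg hno, hdInner_eq_find, nx]
  have heq : (List.range' (i + 1) (a.length - (i + 1))).find?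
        (fun j => decide (i ≠ j) && (a.getD i 0 == a.getD j 0)) =
      (List.range' (i + 1) (a.length - (i + 1))).find?
        (fun j => a.getD i 0 == a.getD j 0) := by
    apply find?_congr_mem
    intro j hj
    have : i + 1 ≤ j := (List.mem_range'_1.mp hj).1
    have hij : i ≠ j := by omega
    simp [hij]
  rw [heq]

lemma hdOuter_eq (a u : List Int) (is : List Nat) (h : ∀ i ∈ is, i < a.length) :
    hdOuter a u is =
      match is.find? (fun i => (nx a i).isSome) with
      | none => -1
      | some i => outF ((nx a i).map (fun j => (i, j))) u := by
  induction is with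
  | nil => rfl
  | cons i is ih =>
    have hi : i < a.length := h i (by simp)
    rw [hdOuter, hdInner_range' a u i hi]
    cases hx : nx a i with
    | none =>
      rw [List.find?_cons_of_neg (p := fun i => (nx a i).isSome) (by simp [hx])]
      simpa using ih (fun k hk => h k (by simp [hk]))
    | some j =>
      rw [List.find?_cons_of_pos (p := fun i => (nx a i).isSome) (by simp [hx])]
      simp [hx, outF]

lemma hasDuplicity_eq_outF (a u : List Int) :
    hasDuplicity a u = outF (refp a) u := by
  rw [hasDuplicity, refp, hdOuter_eq a u _ (fun i hi => List.mem_range.mp hi)]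
  cases hx : (List.range a.length).find? (fun i => (nx a i).isSome) with
  | none => rfl
  | some i => cases hj : nx a i <;> simp [outF]

lemma nx_last (p : List Int) (v : Int) :
    nx (p ++ [v]) p.length = none := by
  have h : (p ++ [v]).length - (p.length + 1) = 0 := by simp
  rw [nx, h]
  rfl

lemma nx_append (p : List Int) (v : Int) (i : Nat) (hi : i < p.length) :
    nx (p ++ [v]) i =
      match nx p i with
      | some j => some j
      | none => if p.getD i 0 == v then some p.length else none := by
  have hlen : (p ++ [v]).length = p.length + 1 := by simp
  have hgi : (p ++ [v]).getD i 0 = p.getD i 0 := List.getD_append p [v] 0 i hi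
  have hn : (p ++ [v]).length - (i + 1) = (p.length - (i + 1)) + 1 := by
    rw [hlen]; omega
  have hend : (i + 1) + 1 * (p.length - (i + 1)) = p.length := by omega
  rw [nx, hn, List.range'_concat, hend, List.find?_append]
  have hcongr : (List.range' (i + 1) (p.length - (i + 1))).find?
        (fun j => (p ++ [v]).getD i 0 == (p ++ [v]).getD j 0) =
      (List.range' (i + 1) (p.length - (i + 1))).find?
        (fun j => p.getD i 0 == p.getD j 0) := by
    apply find?_congr_mem
    intro j hj
    have hj' : j < p.length := by
      have := (List.mem_range'_1.mp hj).2; omega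
    rw [hgi, List.getD_append p [v] 0 j hj']
  rw [hcongr]
  have hgl : (p ++ [v]).getD p.length 0 = v := by
    rw [List.getD_append_right p [v] 0 p.length le_rfl]
    simp
  cases hx : nx p i with
  | some j =>
    rw [nx] at hx
    rw [hx]
    rfl
  | none =>
    rw [nx] at hx
    rw [hx]
    simp only [Option.none_or]
    rw [List.find?_singleton, hgi, hgl]

lemma refp_eq_none_of (a : List Int) (h : ∀ i, i < a.length → nx a i = none) :
    refp a = none := by
  rw [refp]
  have : (List.range a.length).find? (fun i => (nx a i).isSome) = none := by
    rw [List.range_eq_range', find?_range'_eq_none_iff]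
    intro i _ hi2
    simp [h i (by omega)]
  rw [this]

lemma refp_eq_some_of (a : List Int) (i j : Nat) (hi : i < a.length)
    (hx : nx a i = some j) (hk : ∀ k, k < i → nx a k = none) :
    refp a = some (i, j) := by
  rw [refp]
  have : (List.range a.length).find? (fun i => (nx a i).isSome) = some i := by
    rw [List.range_eq_range', find?_range'_eq_some_iff]
    exact ⟨Nat.zero_le _, by omega, by simp [hx], fun k _ hk2 => by simp [hk k hk2]⟩
  rw [this]
  simp [hx]

lemma refp_some_inv (a : List Int) (b : Nat × Nat) (h : refp a = some b) :
    b.1 < a.length ∧ nx a b.1 = some b.2 ∧ ∀ k, k < b.1 → nx a k = none := by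
  rw [refp] at h
  cases hf : (List.range a.length).find? (fun i => (nx a i).isSome) with
  | none => rw [hf] at h; simp at h
  | some i =>
    rw [hf] at h
    rw [List.range_eq_range', find?_range'_eq_some_iff] at hf
    obtain ⟨-, h2, -, h4⟩ := hf
    simp only [] at h
    cases hx : nx a i with
    | none => rw [hx] at h; simp at h
    | some j =>
      rw [hx] at h
      simp at h
      rcases h with rfl
      refine ⟨by omega, hx, fun k hk => ?_⟩
      have := h4 k (Nat.zero_le _) hk
      simpa using this

lemma refp_none_inv (a : List Int) (h : refp a = none) :
    ∀ i, i < a.length → nx a i = none := by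
  rw [refp] at h
  cases hf : (List.range a.length).find? (fun i => (nx a i).isSome) with
  | some i =>
    rw [hf] at h
    simp only [] at h
    have := List.find?_some hf
    cases hx : nx a i with
    | none => rw [hx] at this; simp at this
    | some j => rw [hx] at h; simp at h
  | none =>
    rw [List.range_eq_range', find?_range'_eq_none_iff] at hf
    intro i hi
    have := hf i (Nat.zero_le _) (by omega)
    simpa using this

lemma refp_append (p : List Int) (v : Int) :
    refp (p ++ [v]) =
      match p.findIdx? (fun x => x == v) with
      | none => refp p
      | some i0 =>
        match refp p with
        | none => some (i0, p.length)
        | some b => if i0 < b.1 then some (i0, p.length) else some b := by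
  have hlen : (p ++ [v]).length = p.length + 1 := by simp
  cases hv : p.findIdx? (fun x => x == v) with
  | none =>
    have hnv : ∀ k, k < p.length → (p.getD k 0 == v) = false := by
      intro k hk
      rw [List.getD_eq_getElem p 0 hk]
      exact List.findIdx?_eq_none_iff.mp hv _ (List.getElem_mem hk)
    cases hr : refp p with
    | none =>
      have hall := refp_none_inv p hr
      refine refp_eq_none_of _ (fun i hi => ?_)
      rcases Nat.lt_succ_iff_lt_or_eq.mp (by omega : i < p.length + 1) with hi' | rfl
      · rw [nx_append p v i hi', hall i hi']
        simp only []
        rw [if_neg (by rw [hnv i hi']; exact Bool.false_ne_true)]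
      · exact nx_last p v
    | some b =>
      obtain ⟨hb1, hb2, hb3⟩ := refp_some_inv p b hr
      refine refp_eq_some_of _ b.1 b.2 (by omega) ?_ (fun k hk => ?_)
      · rw [nx_append p v b.1 hb1, hb2]
      · have hk' : k < p.length := by omega
        rw [nx_append p v k hk', hb3 k hk]
        simp only []
        rw [if_neg (by rw [hnv k hk']; exact Bool.false_ne_true)]
  | some i0 =>
    obtain ⟨hi0, hpv, hmin⟩ := List.findIdx?_eq_some_iff_getElem.mp hv
    have hpv' : (p.getD i0 0 == v) = true := by rw [List.getD_eq_getElem p 0 hi0]; exact hpv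
    have hmin' : ∀ k, k < i0 → (p.getD k 0 == v) = false := by
      intro k hk
      rw [List.getD_eq_getElem p 0 (by omega)]
      exact Bool.eq_false_iff.mpr (hmin k hk)
    cases hr : refp p with
    | none =>
      simp only []
      have hall := refp_none_inv p hr
      refine refp_eq_some_of _ i0 p.length (by omega) ?_ (fun k hk => ?_)
      · rw [nx_append p v i0 hi0, hall i0 hi0]
        simp only []
        rw [if_pos hpv']
      · have hk' : k < p.length := by omega
        rw [nx_append p v k hk', hall k hk']
        simp only []
        rw [if_neg (by rw [hmin' k hk]; exact Bool.false_ne_true)]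
    | some b =>
      obtain ⟨hb1, hb2, hb3⟩ := refp_some_inv p b hr
      simp only []
      by_cases hlt : i0 < b.1
      · rw [if_pos hlt]
        refine refp_eq_some_of _ i0 p.length (by omega) ?_ (fun k hk => ?_)
        · rw [nx_append p v i0 hi0, hb3 i0 hlt]
          simp only []
          rw [if_pos hpv']
        · have hk' : k < p.length := by omega
          rw [nx_append p v k hk', hb3 k (by omega)]
          simp only []
          rw [if_neg (by rw [hmin' k hk]; exact Bool.false_ne_true)]
      · rw [if_neg hlt]
        have : refp (p ++ [v]) = some (b.1, b.2) := by
          refine refp_eq_some_of _ b.1 b.2 (by omega) ?_ (fun k hk => ?_)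
          · rw [nx_append p v b.1 hb1, hb2]
          · have hk' : k < p.length := by omega
            rw [nx_append p v k hk', hb3 k hk]
            simp only []
            rw [if_neg (by rw [hmin' k (by omega)]; exact Bool.false_ne_true)]
        simpa using this

lemma foldl_hdStep (p : List Int) :
    ((PySem.List.enumerate p).foldl hdStep (PySem.Dict.empty, none)).2 =
        (refp p).map (fun b => ((b.1 : Int), (b.2 : Int))) ∧
      ∀ w : Int,
        ((PySem.List.enumerate p).foldl hdStep (PySem.Dict.empty, none)).1.get? w =
          (p.findIdx? (fun x => x == w)).map (fun i => (i : Int)) := by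
  induction p using List.reverseRecOn with
  | nil => exact ⟨rfl, fun w => by simp [PySem.List.enumerate]⟩
  | append_singleton p v ih =>
    obtain ⟨ih1, ih2⟩ := ih
    have henum : PySem.List.enumerate (p ++ [v]) =
        PySem.List.enumerate p ++ [((p.length : Int), v)] := by
      rw [PySem.List.enumerate_append]
      simp [PySem.List.enumerate]
    rw [henum, List.foldl_append]
    set st := (PySem.List.enumerate p).foldl hdStep (PySem.Dict.empty, none) with hst
    simp only [List.foldl_cons, List.foldl_nil]
    rw [refp_append]
    cases hv : p.findIdx? (fun x => x == v) with
    | none =>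
      have hget : st.1.get? v = none := by rw [ih2 v, hv]; rfl
      rw [hdStep, hget]
      constructor
      · exact ih1
      · intro w
        rw [PySem.Dict.get?_insert, List.findIdx?_append]
        by_cases hw : w = v
        · subst hw
          rw [hv]
          simp [List.findIdx?_cons]
        · rw [if_neg hw]
          rw [ih2 w]
          cases hfw : p.findIdx? (fun x => x == w) with
          | some i => simp
          | none =>
            have : (v == w) = false := by
              simp only [beq_eq_false_iff_ne]; exact fun h => hw h.symm
            simp [List.findIdx?_cons, this]
    | some i0 =>
      have hget : st.1.get? v = some (i0 : Int) := by rw [ih2 v, hv]; rfl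
      rw [hdStep, hget]
      refine ⟨?_, ?_⟩
      · rw [ih1]
        cases hr : refp p with
        | none => rfl
        | some b =>
          simp only [Option.map_some]
          by_cases hlt : i0 < b.1
          · rw [if_pos hlt, if_pos (by exact_mod_cast hlt)]; rfl
          · rw [if_neg hlt, if_neg (by exact_mod_cast hlt)]; rfl
      · intro w
        rw [ih2 w, List.findIdx?_append]
        cases hfw : p.findIdx? (fun x => x == w) with
        | some i => simp
        | none =>
          by_cases hw : w = v
          · subst hw; rw [hfw] at hv; simp at hv
          · have : (v == w) = false := by
              simp only [beq_eq_false_iff_ne]; exact fun h => hw h.symm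
            simp [List.findIdx?_cons, this]

lemma hasDuplicity_alt_eq_outF (a u : List Int) :
    hasDuplicity_alt a u = outF (refp a) u := by
  rw [hasDuplicity_alt]
  have h := (foldl_hdStep a).1
  simp only [h]
  cases hr : refp a with
  | none => rfl
  | some b => rfl

-- ===== VERDICT (by name: the statement is the Claim_ definition above) =====
theorem hasDuplicity_spec : Claim_equal_hasDuplicity := by
  intro a u _
  unfold Spec_hasDuplicity
  rw [hasDuplicity_eq_outF, hasDuplicity_alt_eq_outF]
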